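-- pv_equiv track=rewrite | github.com/insoo00/Algorithm | programmers/pccp/1/1.py | solution
-- ===== SOURCE A (Python) =====
-- def solution(input_string):
--     answer_list = list()
--     alpha_set = set()
--     prev_string = ''
--     for alpha in input_string:
--         if alpha != prev_string:
--             if alpha in alpha_set:
--                 if alpha not in answer_list:
--                     answer_list.append(alpha)
--             else:
--                 alpha_set.add(alpha)
--         prev_string = alpha
--     answer_list.sort()
--
--     answer = ''
--     if answer_list:
--         for item in answer_list:
--             answer += item
--     else:
--         answer = 'N'
--
--     return answer
-- ===== SOURCE B (Python) =====
-- def solution(input_string):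
--     # phase 1: run-compress the string (keep each char only where it differs from its predecessor)
--     compressed = list(input_string[:1]) + [b for a, b in zip(input_string, input_string[1:]) if b != a]
--     # phase 2: tabulate occurrence counts of the compressed sequence
--     counts = {}
--     for c in compressed:
--         counts[c] = counts.get(c, 0) + 1
--     # phase 3: chars appearing at least twice, sorted
--     result = ''.join(sorted(c for c, n in counts.items() if n >= 2))
--     return result or 'N'
-- ===== Notes on version B (the rewrite author's own statement) =====
-- stated objective: simpler
-- what changed: Replaces A's single interleaved pass with seen-set, dedup'd answer list and prev tracking by a three-phase pipeline: run-compress the string, count the compressed characters with a dict, then select/sort the ones with count >= 2.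
import Mathlib
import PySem

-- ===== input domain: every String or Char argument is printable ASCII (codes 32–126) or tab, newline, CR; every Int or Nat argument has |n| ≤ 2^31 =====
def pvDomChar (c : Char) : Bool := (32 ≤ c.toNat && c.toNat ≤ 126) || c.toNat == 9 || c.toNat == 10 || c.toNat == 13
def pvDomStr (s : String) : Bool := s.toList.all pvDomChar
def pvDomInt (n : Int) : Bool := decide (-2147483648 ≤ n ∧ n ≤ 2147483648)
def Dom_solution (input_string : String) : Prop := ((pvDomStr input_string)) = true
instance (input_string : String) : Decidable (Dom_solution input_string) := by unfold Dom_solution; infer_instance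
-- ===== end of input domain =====

-- B replaces A's single interleaved pass (seen-set + dedup'd answer list + prev char) by a
-- three-phase pipeline: run-compress, count with a dict, select count >= 2 and sort. Same results.

-- ===== PORT A =====
-- the for-loop of A, state = (answer_list, alpha_set, prev_string); prev_string is '' or a 1-char string,
-- ported as a List Char ([] or [c])
def solutionLoopA (ans : List Char) (st : PySem.Set Char) (prev : List Char) : List Char → List Char
  | [] => ans
  | a :: rest =>
    if [a] ≠ prev then
      if PySem.Set.contains st a then
        if a ∉ ans then solutionLoopA (ans ++ [a]) st [a] rest
        else solutionLoopA ans st [a] rest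
      else solutionLoopA ans (PySem.Set.add st a) [a] rest
    else solutionLoopA ans st [a] rest

def solution (input_string : String) : String :=
  let answer_list := PySem.List.sorted (solutionLoopA [] PySem.Set.empty [] input_string.toList) (fun x => x) false
  if answer_list ≠ [] then String.ofList (answer_list.foldl (fun acc c => acc ++ [c]) []) else "N"

-- ===== PORT B =====
def solution_alt (input_string : String) : String :=
  let cs := input_string.toList
  let compressed := PySem.List.slice cs none (some 1) ++
    ((cs.zip (PySem.List.slice cs (some 1) none)).filter (fun p => decide (p.2 ≠ p.1))).map (·.2)
  let counts := compressed.foldl (fun d c => d.insert c (d.getD c 0 + 1)) PySem.Dict.empty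
  let res := PySem.List.sorted ((counts.items.filter (fun p => decide ((2:Int) ≤ p.2))).map (·.1)) (fun x => x) false
  if res ≠ [] then String.ofList res else "N"

-- ===== PRECONDITION & SPEC =====
def Spec_solution (input_string : String) (out : String) : Prop := out = solution_alt input_string
instance (input_string : String) (out : String) : Decidable (Spec_solution input_string out) := by unfold Spec_solution; infer_instance

-- ===== CLAIM (what is proved, stated in full; the proofs are below) =====
def Claim_equal_solution : Prop := ∀ (input_string : String), Dom_solution input_string → Spec_solution input_string (solution input_string)

-- ===== LEMMAS AND PROOFS =====

-- the run-compression of a list, given the previous character ([] = none yet)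
def compA (prev : List Char) : List Char → List Char
  | [] => []
  | a :: rest => if [a] ≠ prev then a :: compA [a] rest else compA [a] rest

-- A's loop restricted to the compressed sequence (the prev-check always fires)
def loopC (ans : List Char) (st : PySem.Set Char) : List Char → List Char
  | [] => ans
  | a :: rest =>
    if PySem.Set.contains st a then
      if a ∉ ans then loopC (ans ++ [a]) st rest
      else loopC ans st rest
    else loopC ans (PySem.Set.add st a) rest

lemma solutionLoopA_eq_loopC (l : List Char) : ∀ ans st prev,
    solutionLoopA ans st prev l = loopC ans st (compA prev l) := by
  induction l with
  | nil => intro ans st prev; rfl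
  | cons a rest ih =>
    intro ans st prev
    by_cases h : [a] = prev
    · simp [solutionLoopA, compA, h, ih]
    · simp only [solutionLoopA, compA, if_pos (by simpa using h)]
      by_cases hst : PySem.Set.contains st a
      · by_cases hans : a ∈ ans <;> simp [loopC, hans, ih]
      · simp [loopC, ih]

lemma compA_single (rest : List Char) : ∀ p,
    compA [p] rest = ((List.zip (p :: rest) rest).filter (fun q => decide (q.2 ≠ q.1))).map (·.2) := by
  induction rest with
  | nil => intro p; rfl
  | cons b r ih =>
    intro p
    by_cases h : b = p
    · simp [compA, h, ih]
    · simp [compA, h, ih]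

lemma compA_nil_eq (cs : List Char) :
    compA [] cs = cs.take 1 ++ ((List.zip cs cs.tail).filter (fun q => decide (q.2 ≠ q.1))).map (·.2) := by
  cases cs with
  | nil => rfl
  | cons a rest => simp [compA, compA_single]

lemma loopC_spec (l : List Char) : ∀ ans st, ans.Nodup →
    (loopC ans st l).Nodup ∧
      ∀ c, c ∈ loopC ans st l ↔
        (c ∈ ans ∨ (c ∈ st ∧ 1 ≤ l.count c) ∨ 2 ≤ l.count c) := by
  induction l with
  | nil => intro ans st hnd; simpa [loopC] using hnd
  | cons a rest ih =>
    intro ans st hnd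
    by_cases hst : a ∈ st
    · by_cases hans : a ∈ ans
      · have hl : loopC ans st (a :: rest) = loopC ans st rest := by simp [loopC, hst, hans]
        obtain ⟨h1, h2⟩ := ih ans st hnd
        rw [hl]
        refine ⟨h1, fun c => ?_⟩
        rw [h2 c]
        by_cases hca : c = a
        · subst hca
          simp only [List.count_cons_self]
          constructor
          · rintro (h | ⟨hc, h⟩ | h)
            exacts [Or.inl hans, Or.inr (Or.inl ⟨hc, by omega⟩), Or.inr (Or.inr (by omega))]
          · intro _; exact Or.inl hans
        · rw [List.count_cons_of_ne (Ne.symm hca)]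
      · have hl : loopC ans st (a :: rest) = loopC (ans ++ [a]) st rest := by
          simp [loopC, hst, hans]
        obtain ⟨h1, h2⟩ := ih (ans ++ [a]) st (by simp only [List.nodup_append, List.nodup_singleton, true_and]; refine ⟨hnd, ?_⟩; intro x hx y hy hxy; rw [List.mem_singleton] at hy; subst hy; subst hxy; exact hans hx)
        rw [hl]
        refine ⟨h1, fun c => ?_⟩
        rw [h2 c]
        by_cases hca : c = a
        · subst hca
          simp only [List.count_cons_self]
          constructor
          · intro _; exact Or.inr (Or.inl ⟨hst, by omega⟩)
          · intro _; exact Or.inl (by simp)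
        · rw [List.count_cons_of_ne (Ne.symm hca)]
          simp [List.mem_append, hca]
    · have hl : loopC ans st (a :: rest) = loopC ans (PySem.Set.add st a) rest := by
        simp [loopC, hst]
      obtain ⟨h1, h2⟩ := ih ans (PySem.Set.add st a) hnd
      rw [hl]
      refine ⟨h1, fun c => ?_⟩
      rw [h2 c]
      by_cases hca : c = a
      · subst hca
        simp only [PySem.Set.mem_add, or_true, true_and, List.count_cons_self]
        constructor
        · rintro (h | h | h)
          exacts [Or.inl h, Or.inr (Or.inr (by omega)), Or.inr (Or.inr (by omega))]
        · rintro (h | ⟨hc, h⟩ | h)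
          · exact Or.inl h
          · exact absurd hc hst
          · exact Or.inr (Or.inl (by omega))
      · rw [List.count_cons_of_ne (Ne.symm hca)]
        simp [PySem.Set.mem_add, hca]

-- ===== VERDICT (by name: the statement is the Claim_ definition above) =====
theorem solution_spec : Claim_equal_solution := by
  intro s _
  unfold Spec_solution solution solution_alt
  have hcomp : PySem.List.slice s.toList none (some 1) ++
      ((s.toList.zip (PySem.List.slice s.toList (some 1) none)).filter
        (fun p => decide (p.2 ≠ p.1))).map (·.2) = compA [] s.toList := by
    rw [PySem.List.slice_from_one, compA_nil_eq]
    congr 1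
    · rw [PySem.List.slice_to s.toList (by norm_num)]
      rfl
  have hA : solutionLoopA [] PySem.Set.empty [] s.toList =
      loopC [] PySem.Set.empty (compA [] s.toList) := solutionLoopA_eq_loopC _ _ _ _
  set comp := compA [] s.toList with hc
  have hR := loopC_spec comp [] PySem.Set.empty List.nodup_nil
  obtain ⟨hndR, hmemR⟩ := hR
  have hmemR' : ∀ c, c ∈ loopC [] PySem.Set.empty comp ↔ 2 ≤ comp.count c := by
    intro c
    rw [hmemR c]
    simp [PySem.Set.empty]
  -- B side selected list
  have hcount : comp.foldl (fun d c => d.insert c (d.getD c 0 + 1)) PySem.Dict.empty =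
      PySem.Dict.counter comp := PySem.Dict.foldl_insert_getD_add_one_eq_counter comp
  have hsel : ((PySem.Dict.counter comp).items.filter (fun p => decide ((2:Int) ≤ p.2))).map (·.1) =
      (PySem.Set.ofList comp).filter (fun k => decide ((2:Int) ≤ (comp.count k : Int))) := by
    rw [PySem.Dict.items_counter, List.filter_map, List.map_map]
    simp [Function.comp_def]
  have hndS : ((PySem.Set.ofList comp).filter
      (fun k => decide ((2:Int) ≤ (comp.count k : Int)))).Nodup :=
    (PySem.Set.nodup_ofList comp).filter _
  have hmemS : ∀ c, c ∈ (PySem.Set.ofList comp).filter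
      (fun k => decide ((2:Int) ≤ (comp.count k : Int))) ↔ 2 ≤ comp.count c := by
    intro c
    rw [List.mem_filter]
    constructor
    · rintro ⟨-, h⟩
      simp only [decide_eq_true_eq] at h
      exact_mod_cast h
    · intro h
      refine ⟨?_, by simp; exact_mod_cast h⟩
      rw [PySem.Set.mem_ofList]
      exact List.count_pos_iff.mp (by omega)
  have hperm : (loopC [] PySem.Set.empty comp).Perm
      ((PySem.Set.ofList comp).filter (fun k => decide ((2:Int) ≤ (comp.count k : Int)))) :=
    (List.perm_ext_iff_of_nodup hndR hndS).mpr (fun c => by rw [hmemR' c, hmemS c])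
  have hmain : PySem.List.sorted (loopC [] PySem.Set.empty comp) (fun x => x) false =
      PySem.List.sorted ((PySem.Set.ofList comp).filter
        (fun k => decide ((2:Int) ≤ (comp.count k : Int)))) (fun x => x) false :=
    (PySem.List.sorted_id_eq_sorted_id_iff_perm _ _).mpr hperm
  simp only [hcomp, hA, hcount, hsel, hmain]
  split_ifs with h
  · congr 1
    exact (PySem.List.foldl_append_singleton _ _).trans (List.nil_append _)
  · rfl
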